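-- pv_equiv track=rewrite | github.com/Crowbrammer/Yates | ~Yates.py | deployYatesOrder
-- ===== SOURCE A (Python) =====
-- def deployYatesOrder(num_letters=3, alphabet="abcdefghijklmnopqrstuvwxyz"):
--     yates_ordered_list = [""]
--     factors = [factor for factor in alphabet[0:num_letters]]
--     for letter in factors:
--         effect_list = []
--         for factor in yates_ordered_list:
--             effect_list.append(factor + letter)
--         yates_ordered_list += effect_list
--     return yates_ordered_list
-- ===== SOURCE B (Python) =====
-- def deployYatesOrder(num_letters=3, alphabet="abcdefghijklmnopqrstuvwxyz"):
--     # Recursive binary decomposition: for the first factor c, the Yates order is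
--     # the order for the remaining factors with each entry s emitted as s, c+s.
--     factors = list(alphabet[0:num_letters])
--     def build(fs):
--         if not fs:
--             return [""]
--         c = fs[0]
--         out = []
--         for s in build(fs[1:]):
--             out.append(s)
--             out.append(c + s)
--         return out
--     return build(factors)
-- ===== Notes on version B (the rewrite author's own statement) =====
-- stated objective: alternative
-- what changed: Replaces A's iterative block-doubling (each letter appends letter-extended copies of the whole accumulator) with recursion on the factor list that interleaves each suffix-order entry s as the pair s, c+s (prepending the first factor).
import Mathlib
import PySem

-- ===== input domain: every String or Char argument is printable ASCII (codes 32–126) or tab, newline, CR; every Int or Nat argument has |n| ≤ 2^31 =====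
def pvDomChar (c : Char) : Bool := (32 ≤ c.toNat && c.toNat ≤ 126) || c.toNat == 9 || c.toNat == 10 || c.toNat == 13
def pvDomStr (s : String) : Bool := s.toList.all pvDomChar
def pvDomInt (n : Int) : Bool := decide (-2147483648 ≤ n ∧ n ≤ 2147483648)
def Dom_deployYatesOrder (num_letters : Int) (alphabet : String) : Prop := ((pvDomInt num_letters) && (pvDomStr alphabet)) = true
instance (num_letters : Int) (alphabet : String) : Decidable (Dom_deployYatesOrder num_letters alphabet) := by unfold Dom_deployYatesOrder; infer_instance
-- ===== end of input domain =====

-- B replaces A's iterative block-doubling with recursion on the factor list,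
-- interleaving each suffix-order entry s as the pair s, c+s (alternative decomposition, same cost).

-- ===== PORT A =====
-- A: start from [""], and for each letter append to the list the letter-extended
-- copies of all current entries. Strings are handled on the List Char side.
def deployYatesOrder (num_letters : Int) (alphabet : String) : List String :=
  let factors : List Char := PySem.List.slice alphabet.toList (some 0) (some num_letters)
  let res : List (List Char) :=
    factors.foldl
      (fun ys c => ys ++ ys.foldl (fun es s => es ++ [s ++ [c]]) []) [[]]
  res.map String.ofList

-- ===== PORT B =====
-- build(fs) of Source B: recursion on the factor list; the loop body appends s then c + s
def buildYates : List Char → List (List Char)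
  | [] => [[]]
  | c :: cs => (buildYates cs).foldl (fun out s => out ++ [s] ++ [c :: s]) []

def deployYatesOrder_alt (num_letters : Int) (alphabet : String) : List String :=
  let factors : List Char := PySem.List.slice alphabet.toList (some 0) (some num_letters)
  (buildYates factors).map String.ofList

-- ===== PRECONDITION & SPEC =====
def Spec_deployYatesOrder (num_letters : Int) (alphabet : String) (out : List String) : Prop := out = deployYatesOrder_alt num_letters alphabet
instance (num_letters : Int) (alphabet : String) (out : List String) : Decidable (Spec_deployYatesOrder num_letters alphabet out) := by unfold Spec_deployYatesOrder; infer_instance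

-- ===== CLAIM (what is proved, stated in full; the proofs are below) =====
def Claim_equal_deployYatesOrder : Prop := ∀ (num_letters : Int) (alphabet : String), Dom_deployYatesOrder num_letters alphabet → Spec_deployYatesOrder num_letters alphabet (deployYatesOrder num_letters alphabet)

-- ===== LEMMAS AND PROOFS =====

-- proof-side bridge: entry k picks the char at bit position j of k (low bit = head)
def pickChars : List Char → Nat → List Char
  | [], _ => []
  | c :: cs, k => (if k % 2 = 1 then [c] else []) ++ pickChars cs (k / 2)

-- appending one factor reads one more (the highest) bit
theorem pickChars_append (cs : List Char) (c : Char) (k : Nat) :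
    pickChars (cs ++ [c]) k =
      pickChars cs k ++ (if k / 2 ^ cs.length % 2 = 1 then [c] else []) := by
  induction cs generalizing k with
  | nil => simp [pickChars]
  | cons a cs ih =>
      simp only [List.cons_append, pickChars, ih (k / 2), List.length_cons,
        List.append_assoc, Nat.div_div_eq_div_mul, pow_succ, mul_comm]

-- pickChars only reads the low cs.length bits
theorem pickChars_low (cs : List Char) (k t : Nat) :
    pickChars cs (k + 2 ^ cs.length * t) = pickChars cs k := by
  induction cs generalizing k t with
  | nil => rfl
  | cons a cs ih =>
      have hrw : k + 2 ^ (a :: cs).length * t = k + 2 * (2 ^ cs.length * t) := by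
        simp [List.length_cons, pow_succ]; ring
      rw [hrw]
      simp only [pickChars, Nat.add_mul_mod_self_left,
        Nat.add_mul_div_left _ _ (by norm_num : 0 < 2)]
      rw [ih]

-- A's doubling loop equals binary subset enumeration (induction from the right)
theorem yates_main (cs : List Char) :
    cs.foldl (fun ys c => ys ++ ys.map (fun s => s ++ [c])) [[]] =
      (List.range (2 ^ cs.length)).map (pickChars cs) := by
  induction cs using List.reverseRecOn with
  | nil => simp [pickChars]
  | append_singleton cs c ih =>
      rw [List.foldl_append, List.foldl_cons, List.foldl_nil, ih]
      have hsplit : 2 ^ (cs ++ [c]).length = 2 ^ cs.length + 2 ^ cs.length := by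
        simp [pow_succ]; ring
      rw [hsplit, List.range_add, List.map_append, List.map_map, List.map_map]
      congr 1
      · apply List.map_congr_left
        intro i hi
        have hlt : i < 2 ^ cs.length := List.mem_range.mp hi
        rw [pickChars_append, Nat.div_eq_of_lt hlt]
        simp
      · apply List.map_congr_left
        intro i hi
        have hlt : i < 2 ^ cs.length := List.mem_range.mp hi
        simp only [Function.comp]
        rw [pickChars_append]
        have h1 : (2 ^ cs.length + i) / 2 ^ cs.length = 1 := by
          rw [add_comm, Nat.add_div_right _ (Nat.two_pow_pos _),
            Nat.div_eq_of_lt hlt]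
        have h2 : pickChars cs (2 ^ cs.length + i) = pickChars cs i := by
          rw [add_comm]
          simpa using pickChars_low cs i 1
        rw [h1, h2]
        simp

-- index split matching B's interleaving
theorem yatesRangeSplit (m : Nat) :
    List.range (2 * m) = (List.range m).flatMap (fun j => [2 * j, 2 * j + 1]) := by
  induction m with
  | zero => rfl
  | succ m ih =>
      have : 2 * (m + 1) = (2 * m + 1) + 1 := by ring
      rw [this, List.range_succ, List.range_succ, List.range_succ,
        List.flatMap_append, ih]
      simp

-- B's recursion equals binary subset enumeration (induction from the left)
theorem build_eq (cs : List Char) :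
    buildYates cs = (List.range (2 ^ cs.length)).map (pickChars cs) := by
  induction cs with
  | nil => simp [buildYates, pickChars]
  | cons c cs ih =>
      have hstep :
          buildYates (c :: cs) = (buildYates cs).flatMap (fun s => [s, c :: s]) := by
        show (buildYates cs).foldl (fun out s => out ++ [s] ++ [c :: s]) [] = _
        have : (fun (out : List (List Char)) s => out ++ [s] ++ [c :: s]) =
            fun out s => out ++ ([s] ++ [c :: s]) := by
          funext out s; simp
        rw [this, PySem.List.foldl_append_eq_flatMap]
        rfl
      rw [hstep, ih]
      have hlen : 2 ^ (c :: cs).length = 2 * 2 ^ cs.length := by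
        simp [List.length_cons, pow_succ]; ring
      rw [hlen, yatesRangeSplit, List.map_flatMap, List.flatMap_map]
      apply List.flatMap_congr
      intro j hj
      have he : pickChars (c :: cs) (2 * j) = pickChars cs j := by
        simp [pickChars, Nat.mul_mod_right, Nat.mul_div_cancel_left j (by norm_num : 0 < 2)]
      have ho : pickChars (c :: cs) (2 * j + 1) = c :: pickChars cs j := by
        have h1 : (2 * j + 1) % 2 = 1 := by omega
        have h2 : (2 * j + 1) / 2 = j := by omega
        simp [pickChars, h1, h2]
      simp [he, ho]

-- ===== VERDICT (by name: the statement is the Claim_ definition above) =====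
theorem deployYatesOrder_spec : Claim_equal_deployYatesOrder := by
  intro num_letters alphabet _
  unfold Spec_deployYatesOrder deployYatesOrder deployYatesOrder_alt
  have hstep :
      (fun (ys : List (List Char)) (c : Char) =>
          ys ++ ys.foldl (fun es s => es ++ [s ++ [c]]) []) =
        fun ys c => ys ++ ys.map (fun s => s ++ [c]) := by
    funext ys c
    rw [PySem.List.foldl_append_singleton_eq_map]
    simp
  simp only [hstep, yates_main, build_eq]
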